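-- pv_equiv track=rewrite | github.com/i-redbyte/leetcode | easy/truncate sentence/solution.py | truncateSentence2
-- ===== SOURCE A (Python) =====
-- def truncateSentence2(s: str, k: int) -> str:
--     result = ""
--     p = 0
--     start = 0
--     n = len(s)
--     while p < k:
--         p += 1
--         for i in range(start, n):
--             result += s[i]
--             start += 1
--             if s[i] == ' ':
--                 break
--     return result.rstrip()
-- ===== SOURCE B (Python) =====
-- def truncateSentence2(s: str, k: int) -> str:
--     words = s.split(' ')
--     return ' '.join(words[:max(k, 0)]).rstrip()
-- ===== Notes on version B (the rewrite author's own statement) =====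
-- stated objective: idiomatic
-- what changed: Replaces A's nested char-by-char scan (outer while over k, inner scan-to-space loop building the result one character at a time by string concatenation) with a single split(' ') / slice-first-k / join(' ') / rstrip pipeline over the word list.
import Mathlib
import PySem

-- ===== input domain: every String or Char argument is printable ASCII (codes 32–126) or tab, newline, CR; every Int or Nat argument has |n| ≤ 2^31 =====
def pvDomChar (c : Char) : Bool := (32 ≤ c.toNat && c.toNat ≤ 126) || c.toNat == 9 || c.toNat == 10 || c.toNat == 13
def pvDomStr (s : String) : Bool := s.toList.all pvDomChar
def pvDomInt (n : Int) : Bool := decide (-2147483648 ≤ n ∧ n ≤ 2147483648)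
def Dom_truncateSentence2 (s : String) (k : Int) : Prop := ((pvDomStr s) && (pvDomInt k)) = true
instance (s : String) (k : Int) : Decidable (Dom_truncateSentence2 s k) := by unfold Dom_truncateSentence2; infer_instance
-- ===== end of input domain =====

-- B replaces A's char-by-char scan-to-space loops with a split(' ') / slice / join(' ') / rstrip pipeline (objective: idiomatic).

-- ===== PORT A =====
-- inner 'for i in range(start, n): result += s[i]; start += 1; if s[i] == ' ': break'
def pvInner (cs : List Char) (result : List Char) (start : Nat) : List Char × Nat :=
  if h : start < cs.length then
    if cs[start] = ' ' then (result ++ [cs[start]], start + 1)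
    else pvInner cs (result ++ [cs[start]]) (start + 1)
  else (result, start)
termination_by cs.length - start

-- outer 'while p < k: p += 1; <inner loop>'
def pvOuter (cs : List Char) (result : List Char) (start : Nat) (p k : Int) : List Char :=
  if h : p < k then
    pvOuter cs (pvInner cs result start).1 (pvInner cs result start).2 (p + 1) k
  else result
termination_by (k - p).toNat
decreasing_by omega

def truncateSentence2 (s : String) (k : Int) : String :=
  String.ofList (PySem.Chars.rstrip (pvOuter s.toList [] 0 0 k))

-- ===== PORT B =====
def truncateSentence2_alt (s : String) (k : Int) : String :=
  String.ofList (PySem.Chars.rstrip (PySem.Chars.join [' ']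
    (PySem.List.slice (PySem.Chars.splitOn s.toList [' ']) none (some (max k 0)))))

-- ===== PRECONDITION & SPEC =====
def Spec_truncateSentence2 (s : String) (k : Int) (out : String) : Prop := out = truncateSentence2_alt s k
instance (s : String) (k : Int) (out : String) : Decidable (Spec_truncateSentence2 s k out) := by unfold Spec_truncateSentence2; infer_instance

-- ===== CLAIM (what is proved, stated in full; the proofs are below) =====
def Claim_equal_truncateSentence2 : Prop := ∀ (s : String) (k : Int), Dom_truncateSentence2 s k → Spec_truncateSentence2 s k (truncateSentence2 s k)

-- ===== LEMMAS AND PROOFS =====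

-- the chunk A's inner loop appends: chars up to and including the first space
def pvSeg : List Char → List Char
  | [] => []
  | c :: t => if c = ' ' then [' '] else c :: pvSeg t

-- what A's outer loop has appended after m iterations on suffix t
def pvCapture (t : List Char) : Nat → List Char
  | 0 => []
  | m + 1 => pvSeg t ++ pvCapture (t.drop (pvSeg t).length) m

-- reference split-on-single-space (head accumulator carried forward)
def pvSplit (pre : List Char) : List Char → List (List Char)
  | [] => [pre]
  | c :: rest => if c = ' ' then pre :: pvSplit [] rest else pvSplit (pre ++ [c]) rest

theorem pvInner_spec (cs : List Char) (r : List Char) (start : Nat) :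
    pvInner cs r start = (r ++ pvSeg (cs.drop start), start + (pvSeg (cs.drop start)).length) := by
  fun_induction pvInner cs r start with
  | case1 r start h hsp =>
      rw [List.drop_eq_getElem_cons h]
      simp [pvSeg, hsp]
  | case2 r start h hsp ih =>
      rw [List.drop_eq_getElem_cons h]
      simp [pvSeg, hsp, ih]
      omega
  | case3 r start h =>
      rw [List.drop_eq_nil_of_le (by omega)]
      simp [pvSeg]

theorem pvOuter_spec (cs : List Char) (r : List Char) (start : Nat) (p k : Int) :
    pvOuter cs r start p k = r ++ pvCapture (cs.drop start) (k - p).toNat := by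
  fun_induction pvOuter cs r start p k with
  | case1 r start p h ih =>
      rw [pvInner_spec] at ih
      have hm : (k - p).toNat = (k - (p + 1)).toNat + 1 := by omega
      rw [pvInner_spec, ih, hm]
      simp [pvCapture, List.drop_drop, Nat.add_comm]
  | case2 r start p h =>
      have : (k - p).toNat = 0 := by omega
      simp [this, pvCapture]

theorem pvCapture_nil (m : Nat) : pvCapture [] m = [] := by
  induction m with
  | zero => rfl
  | succ m ih => simp [pvCapture, pvSeg, ih]

theorem pvSplit_ne_nil (t : List Char) (pre : List Char) : pvSplit pre t ≠ [] := by
  cases t with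
  | nil => simp [pvSplit]
  | cons c rest => by_cases h : c = ' ' <;> simp [pvSplit, h] <;> exact pvSplit_ne_nil rest _

theorem pvSplit_pre (t : List Char) (pre w : List Char) (ws : List (List Char))
    (h : pvSplit [] t = w :: ws) : pvSplit pre t = (pre ++ w) :: ws := by
  induction t generalizing pre w ws with
  | nil => simp [pvSplit] at h ⊢; simp [← h.1, h.2]
  | cons c rest ih =>
      by_cases hc : c = ' '
      · simp [pvSplit, hc] at h ⊢
        exact ⟨by simp [← h.1], h.2⟩
      · simp [pvSplit, hc] at h ⊢
        obtain ⟨w', ws', hw⟩ : ∃ w' ws', pvSplit [] rest = w' :: ws' := by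
          cases hsp : pvSplit [] rest with
          | nil => exact absurd hsp (pvSplit_ne_nil rest [])
          | cons a b => exact ⟨a, b, rfl⟩
        rw [ih [c] w' ws' hw] at h
        rw [ih (pre ++ [c]) w' ws' hw]
        simp at h
        simp [← h.1, h.2]

theorem pvGo_spec (l : List Char) (fuel : Nat) (cur : List Char) (acc : List (List Char))
    (h : l.length < fuel) :
    PySem.Chars.splitOn.go [' '] fuel l cur acc = acc.reverse ++ pvSplit cur.reverse l := by
  induction l generalizing fuel cur acc with
  | nil =>
      obtain ⟨f, rfl⟩ : ∃ f, fuel = f + 1 := ⟨fuel - 1, by omega⟩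
      simp [PySem.Chars.splitOn.go, pvSplit]
  | cons c rest ih =>
      obtain ⟨f, rfl⟩ : ∃ f, fuel = f + 1 := ⟨fuel - 1, by omega⟩
      by_cases hc : c = ' '
      · subst hc
        rw [show PySem.Chars.splitOn.go [' '] (f + 1) (' ' :: rest) cur acc
              = PySem.Chars.splitOn.go [' '] f rest [] (cur.reverse :: acc) by
            simp [PySem.Chars.splitOn.go, List.isPrefixOf]]
        rw [ih f [] (cur.reverse :: acc) (by simp at h; omega)]
        simp [pvSplit]
      · rw [show PySem.Chars.splitOn.go [' '] (f + 1) (c :: rest) cur acc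
              = PySem.Chars.splitOn.go [' '] f rest (c :: cur) acc by
            simp [PySem.Chars.splitOn.go, List.isPrefixOf]
            intro h'
            exact absurd h'.symm hc]
        rw [ih f (c :: cur) acc (by simp at h; omega)]
        simp [pvSplit, hc]

theorem pvSplitOn_eq (t : List Char) : PySem.Chars.splitOn t [' '] = pvSplit [] t := by
  rw [PySem.Chars.splitOn, pvGo_spec t (t.length + 1) [] [] (by omega)]
  simp

theorem pvRstrip_congr (x u v : List Char) (h : PySem.Chars.rstrip u = PySem.Chars.rstrip v) :
    PySem.Chars.rstrip (x ++ u) = PySem.Chars.rstrip (x ++ v) := by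
  have hd : List.dropWhile PySem.Chars.isspace u.reverse
      = List.dropWhile PySem.Chars.isspace v.reverse := by
    have := congrArg List.reverse h
    simpa [PySem.Chars.rstrip] using this
  simp [PySem.Chars.rstrip, List.dropWhile_append, hd]

theorem pvJoin_space (w : List Char) (L : List (List Char)) :
    PySem.Chars.join [' '] ([] :: w :: L) = ' ' :: PySem.Chars.join [' '] (w :: L) := by
  rw [PySem.Chars.join_cons_cons]; simp

theorem pvJoin_cons (c : Char) (w : List Char) (L : List (List Char)) :
    PySem.Chars.join [' '] ((c :: w) :: L) = c :: PySem.Chars.join [' '] (w :: L) := by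
  cases L with
  | nil => simp [PySem.Chars.join_singleton]
  | cons q R => rw [PySem.Chars.join_cons_cons, PySem.Chars.join_cons_cons]; simp

theorem pvMain (m : Nat) (t : List Char) :
    PySem.Chars.rstrip (pvCapture t m)
      = PySem.Chars.rstrip (PySem.Chars.join [' '] ((pvSplit [] t).take m)) := by
  induction m generalizing t with
  | zero => simp [pvCapture, PySem.Chars.join_nil]
  | succ m ihm =>
      induction t with
      | nil => simp [pvCapture_nil, pvSplit, PySem.Chars.join_singleton]
      | cons c rest iht =>
          by_cases hc : c = ' '
          · subst hc
            cases m with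
            | zero =>
                have h1 : pvCapture (' ' :: rest) 1 = [' '] := by simp [pvCapture, pvSeg]
                have h2 : (pvSplit [] (' ' :: rest)).take 1 = [[]] := by simp [pvSplit]
                rw [h1, h2, PySem.Chars.join_singleton]
                decide
            | succ m' =>
                obtain ⟨w, ws, hw⟩ : ∃ w ws, pvSplit [] rest = w :: ws := by
                  cases hsp : pvSplit [] rest with
                  | nil => exact absurd hsp (pvSplit_ne_nil rest [])
                  | cons a b => exact ⟨a, b, rfl⟩
                have hcap : pvCapture (' ' :: rest) (m' + 1 + 1)
                    = [' '] ++ pvCapture rest (m' + 1) := by simp [pvCapture, pvSeg]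
                have htake : (pvSplit [] (' ' :: rest)).take (m' + 1 + 1)
                    = [] :: w :: List.take m' ws := by
                  simp [pvSplit, hw, List.take_succ_cons]
                rw [hcap, htake, pvJoin_space]
                have ih' : PySem.Chars.rstrip (pvCapture rest (m' + 1))
                    = PySem.Chars.rstrip (PySem.Chars.join [' '] (w :: List.take m' ws)) := by
                  rw [ihm rest, hw, List.take_succ_cons]
                simpa using pvRstrip_congr [' '] _ _ ih'
          · obtain ⟨w, ws, hw⟩ : ∃ w ws, pvSplit [] rest = w :: ws := by
              cases hsp : pvSplit [] rest with
              | nil => exact absurd hsp (pvSplit_ne_nil rest [])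
              | cons a b => exact ⟨a, b, rfl⟩
            have hcap : pvCapture (c :: rest) (m + 1) = [c] ++ pvCapture rest (m + 1) := by
              simp [pvCapture, pvSeg, hc]
            have hsp2 : pvSplit [] (c :: rest) = (c :: w) :: ws := by
              simp [pvSplit, hc]
              exact pvSplit_pre rest [c] w ws hw
            have htake : (pvSplit [] (c :: rest)).take (m + 1)
                = (c :: w) :: List.take m ws := by
              rw [hsp2, List.take_succ_cons]
            rw [hcap, htake, pvJoin_cons]
            have ih' : PySem.Chars.rstrip (pvCapture rest (m + 1))
                = PySem.Chars.rstrip (PySem.Chars.join [' '] (w :: List.take m ws)) := by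
              rw [iht, hw, List.take_succ_cons]
            simpa using pvRstrip_congr [c] _ _ ih'

-- ===== VERDICT (by name: the statement is the Claim_ definition above) =====
theorem truncateSentence2_spec : Claim_equal_truncateSentence2 := by
  intro s k _
  unfold Spec_truncateSentence2 truncateSentence2 truncateSentence2_alt
  rw [pvOuter_spec]
  rw [PySem.List.slice_to _ (by omega)]
  have hmax : (max k 0).toNat = (k - 0).toNat := by omega
  rw [hmax, pvSplitOn_eq]
  simp only [List.drop_zero, List.nil_append]
  rw [pvMain]
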